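-- pv_equiv track=rewrite | github.com/ninhdk-datasci/CodePtit-Python | PY04012.py | calculate_grade
-- ===== SOURCE A (Python) =====
-- from collections import defaultdict
--
-- def calculate_grade(s):
--     map = defaultdict(int)
--
--     for c in s:
--         map[c] += 1
--
--     res = 10
--
--     for c in map.keys():
--         if c == 'm': res -= map[c]
--         if c == 'v': res -= (map[c] * 2)
--     return res
-- ===== SOURCE B (Python) =====
-- def calculate_grade(s):
--     weights = {'m': 1, 'v': 2}
--     penalty = 0
--     for c in s:
--         penalty += weights.get(c, 0)
--     return 10 - penalty
-- ===== Notes on version B (the rewrite author's own statement) =====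
-- stated objective: simpler
-- what changed: Replaces A's two-stage frequency-dict build plus key iteration with a single forward pass that accumulates a per-character penalty from a fixed weight table and subtracts it from 10 once.
import Mathlib
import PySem

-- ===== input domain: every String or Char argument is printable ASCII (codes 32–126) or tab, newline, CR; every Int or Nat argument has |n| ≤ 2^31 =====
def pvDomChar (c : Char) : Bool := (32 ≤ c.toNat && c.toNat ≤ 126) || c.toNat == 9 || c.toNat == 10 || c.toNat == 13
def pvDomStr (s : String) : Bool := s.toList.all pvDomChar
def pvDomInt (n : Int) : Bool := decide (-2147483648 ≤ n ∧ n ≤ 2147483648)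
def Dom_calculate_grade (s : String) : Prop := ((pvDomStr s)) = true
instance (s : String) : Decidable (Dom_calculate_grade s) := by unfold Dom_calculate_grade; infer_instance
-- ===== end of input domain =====

-- B replaces A's two-stage frequency-dict build + key loop with a single forward pass
-- accumulating a per-character penalty from a fixed weight table (objective: simpler).

-- ===== PORT A =====
def calculate_grade (s : String) : Int :=
  let map := s.toList.foldl (fun d c => d.modify c 0 (· + 1)) (PySem.Dict.empty : PySem.Dict Char Int)
  let res : Int := 10
  map.keys.foldl (fun res c =>
    let res := if c == 'm' then res - map.getD c 0 else res
    let res := if c == 'v' then res - (map.getD c 0 * 2) else res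
    res) res

-- ===== PORT B =====
def calculate_grade_alt (s : String) : Int :=
  let weights : PySem.Dict Char Int := PySem.Dict.ofList [('m', 1), ('v', 2)]
  let penalty : Int := s.toList.foldl (fun p c => p + weights.getD c 0) 0
  10 - penalty

-- ===== PRECONDITION & SPEC =====
def Spec_calculate_grade (s : String) (out : Int) : Prop := out = calculate_grade_alt s
instance (s : String) (out : Int) : Decidable (Spec_calculate_grade s out) := by unfold Spec_calculate_grade; infer_instance

-- ===== CLAIM (what is proved, stated in full; the proofs are below) =====
def Claim_equal_calculate_grade : Prop := ∀ (s : String), Dom_calculate_grade s → Spec_calculate_grade s (calculate_grade s)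

-- ===== LEMMAS AND PROOFS =====

-- The weight table looks up 1 for 'm', 2 for 'v', 0 otherwise.
theorem weights_lookup (c : Char) :
    (PySem.Dict.ofList [('m', (1 : Int)), ('v', 2)]).getD c 0
      = if c = 'm' then 1 else if c = 'v' then 2 else 0 := by
  by_cases hm : c = 'm'
  · subst hm; decide
  · by_cases hv : c = 'v'
    · subst hv; decide
    · have hd : PySem.Dict.ofList [('m', (1 : Int)), ('v', 2)] = PySem.Dict.mk [('m', 1), ('v', 2)] := by decide
      have h1 : ('m' == c) = false := by simp; exact fun h => hm h.symm
      have h2 : ('v' == c) = false := by simp; exact fun h => hv h.symm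
      simp [hd, PySem.Dict.getD, PySem.Dict.get?_mk_cons, h1, h2, PySem.Dict.get?, hm, hv]

-- B's penalty pass sums to count 'm' + 2 * count 'v'.
theorem penalty_eq (l : List Char) : ∀ (p : Int),
    l.foldl (fun p c => p + (PySem.Dict.ofList [('m', (1 : Int)), ('v', 2)]).getD c 0) p
      = p + l.count 'm' + 2 * l.count 'v' := by
  induction l with
  | nil => intro p; simp
  | cons a t ih =>
    intro p
    rw [List.foldl_cons, ih, weights_lookup]
    by_cases hm : a = 'm'
    · subst hm
      have : ('v' : Char) ≠ 'm' := by decide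
      simp
      ring
    · by_cases hv : a = 'v'
      · subst hv
        have : ('m' : Char) ≠ 'v' := by decide
        simp
        ring
      · have h1 : ('m' == a) = false := by simp; exact fun h => hm h.symm
        have h2 : ('v' == a) = false := by simp; exact fun h => hv h.symm
        simp [hm, hv]

-- A's key loop: subtract map['m'] and 2*map['v'] once each (keys are distinct).
theorem keyloop (d : PySem.Dict Char Int) : ∀ (ks : List Char), ks.Nodup → ∀ r : Int,
    ks.foldl (fun res c =>
      let res := if c == 'm' then res - d.getD c 0 else res
      let res := if c == 'v' then res - (d.getD c 0 * 2) else res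
      res) r
    = r - (if 'm' ∈ ks then d.getD 'm' 0 else 0) - (if 'v' ∈ ks then d.getD 'v' 0 * 2 else 0) := by
  intro ks
  induction ks with
  | nil => intro _ r; simp
  | cons a t ih =>
    intro hnd r
    have hat : a ∉ t := (List.nodup_cons.mp hnd).1
    have hnt : t.Nodup := (List.nodup_cons.mp hnd).2
    rw [List.foldl_cons, ih hnt]
    by_cases hm : a = 'm'
    · subst hm
      have hmv : ('m' : Char) ≠ 'v' := by decide
      have h1 : 'm' ∈ ('m' :: t) := List.mem_cons_self
      have h2 : ('m' ∈ t) = False := by simp [hat]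
      have h3 : ('v' ∈ ('m' :: t)) ↔ ('v' ∈ t) := by simp [List.mem_cons, hmv.symm]
      simp [h1, h2, h3]
    · by_cases hv : a = 'v'
      · subst hv
        have hvm : ('v' : Char) ≠ 'm' := by decide
        have h1 : 'v' ∈ ('v' :: t) := List.mem_cons_self
        have h2 : ('v' ∈ t) = False := by simp [hat]
        have h3 : ('m' ∈ ('v' :: t)) ↔ ('m' ∈ t) := by simp [List.mem_cons, hvm.symm]
        simp [h1, h2, h3]
        ring_nf
      · have h3 : ('m' ∈ (a :: t)) ↔ ('m' ∈ t) := by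
          simp [List.mem_cons]; exact fun h => absurd h.symm hm
        have h4 : ('v' ∈ (a :: t)) ↔ ('v' ∈ t) := by
          simp [List.mem_cons]; exact fun h => absurd h.symm hv
        simp [hm, hv, h3, h4]

-- ===== VERDICT (by name: the statement is the Claim_ definition above) =====
theorem calculate_grade_spec : Claim_equal_calculate_grade := by
  intro s _
  unfold Spec_calculate_grade calculate_grade calculate_grade_alt
  rw [← PySem.Dict.counter_eq_foldl]
  rw [keyloop _ _ (by rw [PySem.Dict.keys_counter]; exact PySem.Set.nodup_ofList _)]
  rw [PySem.Dict.keys_counter]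
  simp only [penalty_eq]
  by_cases hm : 'm' ∈ s.toList
  · by_cases hv : 'v' ∈ s.toList
    · simp [PySem.Set.mem_ofList, hm, hv, PySem.Dict.getD_counter]; ring
    · have : s.toList.count 'v' = 0 := List.count_eq_zero.mpr hv
      simp [PySem.Set.mem_ofList, hm, hv, PySem.Dict.getD_counter, this]
  · have hm0 : s.toList.count 'm' = 0 := List.count_eq_zero.mpr hm
    by_cases hv : 'v' ∈ s.toList
    · simp [PySem.Set.mem_ofList, hm, hv, PySem.Dict.getD_counter, hm0]; ring
    · have hv0 : s.toList.count 'v' = 0 := List.count_eq_zero.mpr hv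
      simp [PySem.Set.mem_ofList, hm, hv, hm0, hv0]
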